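-- pv_equiv track=rewrite | github.com/lalquier/Obsidian | FixFrontmatterSections.py | fix_multiline_unquoted_alias_url
-- ===== SOURCE A (Python) =====
-- def fix_multiline_unquoted_alias_url(frontmatter_raw):
--     """
--     Fixes broken alias blocks like:
--     aliases: [
--         https://...]
--     Into:
--     aliases:
--       - "https://..."
--     """
--     lines = frontmatter_raw.splitlines()
--     fixed_lines = []
--     i = 0
--
--     while i < len(lines):
--         line = lines[i].strip()
--         if line.startswith("aliases: [") and i + 1 < len(lines):
--             next_line = lines[i + 1].strip()
--             if next_line.startswith("http://") or next_line.startswith("https://"):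
--                 url = next_line.rstrip(']')  # trim closing bracket if present
--                 fixed_lines.append("aliases:")
--                 fixed_lines.append(f'  - "{url}"')
--                 i += 2  # skip both lines
--                 continue
--         fixed_lines.append(lines[i])
--         i += 1
--
--     return '\n'.join(fixed_lines)
-- ===== SOURCE B (Python) =====
-- def fix_multiline_unquoted_alias_url(frontmatter_raw):
--     def go(lines):
--         if len(lines) >= 2:
--             head, nxt = lines[0].strip(), lines[1].strip()
--             if head.startswith("aliases: [") and (
--                 nxt.startswith("http://") or nxt.startswith("https://")
--             ):
--                 return ["aliases:", '  - "' + nxt.rstrip(']') + '"'] + go(lines[2:])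
--         if lines:
--             return [lines[0]] + go(lines[1:])
--         return []
--
--     return '\n'.join(go(frontmatter_raw.splitlines()))
-- ===== Notes on version B (the rewrite author's own statement) =====
-- stated objective: alternative
-- what changed: Replaces A's while-loop over an integer index with explicit i+=1/i+=2 stepping and an accumulator list by a structural recursion that pattern-matches on the first two lines and builds the output front-to-back.
import Mathlib
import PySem

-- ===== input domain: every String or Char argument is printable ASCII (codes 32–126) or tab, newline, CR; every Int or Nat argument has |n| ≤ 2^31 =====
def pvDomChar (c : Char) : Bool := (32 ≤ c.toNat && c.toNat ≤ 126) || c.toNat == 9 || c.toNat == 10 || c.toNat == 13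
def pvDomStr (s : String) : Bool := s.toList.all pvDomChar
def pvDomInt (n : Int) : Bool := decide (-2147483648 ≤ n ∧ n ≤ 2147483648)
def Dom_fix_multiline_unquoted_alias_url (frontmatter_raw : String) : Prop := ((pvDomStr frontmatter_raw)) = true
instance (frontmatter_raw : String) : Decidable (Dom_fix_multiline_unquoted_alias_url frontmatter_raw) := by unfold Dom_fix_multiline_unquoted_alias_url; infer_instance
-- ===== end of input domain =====

-- B replaces A's index-stepping while loop with accumulator by a structural recursion on the
-- line list matching its first two elements (objective: alternative decomposition, same cost).


-- ===== PORT A =====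
-- url = next_line.rstrip(']') : PySem has no right-strip-by-chars, ported by hand
-- (drop all trailing ']' characters); exact for Python's str.rstrip(']').
def pvRstripBracket (s : String) : String :=
  String.ofList ((s.toList.reverse.dropWhile (· == ']')).reverse)

-- the while loop of A: index i, accumulator fixed_lines
def pvLoopA (lines : List String) (i : Nat) (acc : List String) : List String :=
  if h : i < lines.length then
    let line := PySem.Str.strip lines[i]
    if h2 : PySem.Str.startswith line "aliases: [" = true ∧ i + 1 < lines.length then
      let next_line := PySem.Str.strip (lines[i + 1]'h2.2)
      if PySem.Str.startswith next_line "http://" || PySem.Str.startswith next_line "https://" then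
        pvLoopA lines (i + 2) (acc ++ ["aliases:", "  - \"" ++ pvRstripBracket next_line ++ "\""])
      else
        pvLoopA lines (i + 1) (acc ++ [lines[i]])
    else
      pvLoopA lines (i + 1) (acc ++ [lines[i]])
  else acc
termination_by lines.length - i

def fix_multiline_unquoted_alias_url (frontmatter_raw : String) : String :=
  PySem.Str.join "\n" (pvLoopA (PySem.Str.splitlines frontmatter_raw) 0 [])

-- ===== PORT B =====
-- B's recursion `go`: match on the first two lines, build output front-to-back.
def pvGoB : List String → List String
  | a :: b :: rest =>
    let head := PySem.Str.strip a
    let nxt := PySem.Str.strip b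
    if PySem.Str.startswith head "aliases: [" &&
        (PySem.Str.startswith nxt "http://" || PySem.Str.startswith nxt "https://") then
      "aliases:" :: ("  - \"" ++ pvRstripBracket nxt ++ "\"") :: pvGoB rest
    else
      a :: pvGoB (b :: rest)
  | [a] => [a]
  | [] => []

def fix_multiline_unquoted_alias_url_alt (frontmatter_raw : String) : String :=
  PySem.Str.join "\n" (pvGoB (PySem.Str.splitlines frontmatter_raw))

-- ===== PRECONDITION & SPEC =====
def Spec_fix_multiline_unquoted_alias_url (frontmatter_raw : String) (out : String) : Prop := out = fix_multiline_unquoted_alias_url_alt frontmatter_raw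
instance (frontmatter_raw : String) (out : String) : Decidable (Spec_fix_multiline_unquoted_alias_url frontmatter_raw out) := by unfold Spec_fix_multiline_unquoted_alias_url; infer_instance

-- ===== CLAIM (what is proved, stated in full; the proofs are below) =====
def Claim_equal_fix_multiline_unquoted_alias_url : Prop := ∀ (frontmatter_raw : String), Dom_fix_multiline_unquoted_alias_url frontmatter_raw → Spec_fix_multiline_unquoted_alias_url frontmatter_raw (fix_multiline_unquoted_alias_url frontmatter_raw)

-- ===== LEMMAS AND PROOFS =====

-- The while loop starting at index i computes acc ++ (B's recursion on the remaining suffix).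
theorem pvLoopA_eq_goB (lines : List String) (i : Nat) (acc : List String) :
    pvLoopA lines i acc = acc ++ pvGoB (lines.drop i) := by
  induction i, acc using pvLoopA.induct (lines := lines) with
  | case1 i acc h line h2 next_line h3 ih =>
      rw [pvLoopA, dif_pos h, dif_pos h2, if_pos h3, ih,
        List.drop_eq_getElem_cons h, List.drop_eq_getElem_cons h2.2, pvGoB]
      simp [line, next_line] at h2 h3 ⊢
      rcases h3 with h3|h3 <;> simp [h2.1, h3]
  | case2 i acc h line h2 next_line h3 ih =>
      rw [pvLoopA, dif_pos h, dif_pos h2, if_neg h3, ih,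
        List.drop_eq_getElem_cons h, List.drop_eq_getElem_cons h2.2, pvGoB]
      simp [line, next_line] at h2 h3 ⊢
      simp [h3.1, h3.2]
  | case3 i acc h line h2 ih =>
      rw [pvLoopA, dif_pos h, dif_neg h2, ih, List.drop_eq_getElem_cons h]
      by_cases hb : i + 1 < lines.length
      · have hs : PySem.Str.startswith line "aliases: [" = false := by
          rcases Bool.eq_false_or_eq_true (PySem.Str.startswith line "aliases: [") with ht | hf
          · exact absurd ⟨ht, hb⟩ h2
          · exact hf
        rw [List.drop_eq_getElem_cons hb, pvGoB]
        simp [line] at hs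
        simp [hs, ← List.drop_eq_getElem_cons hb]
      · have : List.drop (i + 1) lines = [] := List.drop_eq_nil_of_le (by omega)
        rw [this]
        simp [pvGoB]
  | case4 i acc h =>
      rw [pvLoopA, dif_neg h, List.drop_eq_nil_of_le (by omega)]
      simp [pvGoB]

-- ===== VERDICT (by name: the statement is the Claim_ definition above) =====
theorem fix_multiline_unquoted_alias_url_spec : Claim_equal_fix_multiline_unquoted_alias_url := by
  intro s _
  unfold Spec_fix_multiline_unquoted_alias_url fix_multiline_unquoted_alias_url fix_multiline_unquoted_alias_url_alt
  rw [pvLoopA_eq_goB]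
  simp
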